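-- pv_equiv track=rewrite | github.com/Luisa3010/HYPe | Scripts/possible_AA_for_motifs.py | find_variable_positions
-- ===== SOURCE A (Python) =====
-- def find_variable_positions(combinations):
--     variable_positions = [0]  * len(combinations[0])
--     letter_variations = [[] for i in range(len(combinations[0]))]
--     for combination in combinations:
--         for i in range(0, len(combination)):
--             if not combination[i] in letter_variations[i]:
--                 letter_variations[i].append(combination[i])
--                 variable_positions[i] += 1
--
--     return variable_positions
-- ===== SOURCE B (Python) =====
-- def find_variable_positions(combinations):
--     width = len(combinations[0])
--     result = []
--     for i in range(width):
--         col = sorted(c[i] for c in combinations if i < len(c))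
--         count = 0
--         prev = None
--         for ch in col:
--             if ch != prev:
--                 count += 1
--             prev = ch
--         result.append(count)
--     return result
-- ===== Notes on version B (the rewrite author's own statement) =====
-- stated objective: alternative
-- what changed: Sort-then-scan distinct counting: B sorts each column and counts runs of adjacent distinct characters, replacing A's row-major loop that maintains per-position seen-letter lists with linear membership tests and counters.
import Mathlib
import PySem

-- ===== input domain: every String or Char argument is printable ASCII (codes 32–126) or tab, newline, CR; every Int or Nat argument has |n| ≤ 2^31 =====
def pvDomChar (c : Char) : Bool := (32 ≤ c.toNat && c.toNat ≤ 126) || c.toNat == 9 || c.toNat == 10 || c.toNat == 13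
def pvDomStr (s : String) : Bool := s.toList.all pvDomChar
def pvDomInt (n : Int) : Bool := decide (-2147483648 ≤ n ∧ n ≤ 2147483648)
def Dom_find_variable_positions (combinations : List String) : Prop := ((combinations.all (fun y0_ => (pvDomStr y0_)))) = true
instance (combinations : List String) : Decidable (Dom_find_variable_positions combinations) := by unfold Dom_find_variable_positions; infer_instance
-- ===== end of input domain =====

-- B sorts each column and counts runs of adjacent distinct characters (sort-then-scan),
-- replacing A's row-major loop with per-position seen-letter lists; objective: alternative.

-- ===== PORT A =====
-- A's inner loop body: i ranges over range(0, len(combination)); combination[i] is in range,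
-- ported as getD (exact here since i < length); letter_variations[i]/variable_positions[i]
-- reads and writes are getD/set (exact whenever i is in range, which Pre_ guarantees).
def pvStepA (comb : String) (st : List Int × List (List Char)) : List Int × List (List Char) :=
  (List.range comb.toList.length).foldl (fun st i =>
    let ch := comb.toList.getD i ' '
    let seen := st.2.getD i []
    if ch ∈ seen then st
    else (st.1.set i (st.1.getD i 0 + 1), st.2.set i (seen ++ [ch]))) st

def find_variable_positions (combinations : List String) : List Int :=
  let n := ((PySem.List.pyGet? combinations 0).getD "").length   -- len(combinations[0]); Pre_ excludes the empty list (IndexError)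
  let st := combinations.foldl (fun st comb => pvStepA comb st)
    (List.replicate n 0, List.replicate n [])                     -- [0]*n, [[] for _ in range(n)]
  st.1

-- ===== PORT B =====
-- inner scan of Source B: count = 0; prev = None; for ch in col: if ch != prev: count += 1; prev = ch
def pvStepB (st : Int × Option Char) (ch : Char) : Int × Option Char :=
  (if some ch ≠ st.2 then st.1 + 1 else st.1, some ch)

def find_variable_positions_alt (combinations : List String) : List Int :=
  let width := ((PySem.List.pyGet? combinations 0).getD "").length   -- len(combinations[0])
  (List.range width).foldl (fun result i =>
    let col := PySem.List.sorted (combinations.filterMap (fun c =>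
        if i < c.toList.length then some (c.toList.getD i ' ') else none)) (fun x => x) false
    result ++ [(col.foldl pvStepB ((0 : Int), (none : Option Char))).1]) []

-- ===== PRECONDITION & SPEC =====
-- Pre_ excludes exactly where A raises IndexError: the empty list (combinations[0]) and
-- lists with a row longer than the first row (A indexes its width-of-first-row accumulators).
def Pre_find_variable_positions (combinations : List String) : Prop :=
  combinations ≠ [] ∧ ∀ c ∈ combinations, c.toList.length ≤ (combinations.headD "").toList.length
instance (combinations : List String) : Decidable (Pre_find_variable_positions combinations) := by unfold Pre_find_variable_positions; infer_instance
def pvWitness_find_variable_positions : List String := ["ab", "cd", "c"]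

def Spec_find_variable_positions (combinations : List String) (out : List Int) : Prop := out = find_variable_positions_alt combinations
instance (combinations : List String) (out : List Int) : Decidable (Spec_find_variable_positions combinations out) := by unfold Spec_find_variable_positions; infer_instance

-- ===== CLAIM (what is proved, stated in full; the proofs are below) =====
def Claim_equal_find_variable_positions : Prop := ∀ (combinations : List String), Dom_find_variable_positions combinations → Pre_find_variable_positions combinations → Spec_find_variable_positions combinations (find_variable_positions combinations)

-- ===== LEMMAS AND PROOFS =====

-- column i of the processed rows (the source of B's sorted column)
def pvCol (rows : List String) (i : Nat) : List Char :=
  rows.filterMap (fun c => if i < c.toList.length then some (c.toList.getD i ' ') else none)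

theorem pv_set_map_range {α : Type} (n m : Nat) (hm : m < n) (F : Nat → α) (v : α) :
    ((List.range n).map F).set m v = (List.range n).map (fun i => if i = m then v else F i) := by
  apply List.ext_getElem <;> simp
  intro i hi
  rcases eq_or_ne i m with rfl | h
  · simp
  · simp [List.getElem_set, h, Ne.symm h]

theorem pv_inner (comb : String) (n : Nat) (h : comb.toList.length ≤ n) (g : Nat → List Char) :
    pvStepA comb ((List.range n).map (fun i => (((g i).length : Int))), (List.range n).map g)
    = ((List.range n).map (fun i =>
         (((if i < comb.toList.length then PySem.Set.add (g i) (comb.toList.getD i ' ') else g i).length : Int))),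
       (List.range n).map (fun i =>
         if i < comb.toList.length then PySem.Set.add (g i) (comb.toList.getD i ' ') else g i)) := by
  unfold pvStepA
  set L := comb.toList with hL
  clear_value L
  suffices H : ∀ m ≤ L.length,
      (List.range m).foldl (fun st i =>
        let ch := L.getD i ' '
        let seen := st.2.getD i []
        if ch ∈ seen then st
        else (st.1.set i (st.1.getD i 0 + 1), st.2.set i (seen ++ [ch])))
        ((List.range n).map (fun i => (((g i).length : Int))), (List.range n).map g)
      = ((List.range n).map (fun i => (((if i < m then PySem.Set.add (g i) (L.getD i ' ') else g i).length : Int))),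
         (List.range n).map (fun i => if i < m then PySem.Set.add (g i) (L.getD i ' ') else g i)) by
    exact H L.length le_rfl
  intro m hm
  induction m with
  | zero => simp
  | succ m ih =>
    have hmn : m < n := lt_of_lt_of_le (Nat.lt_of_lt_of_le (Nat.lt_succ_self m) hm) h
    rw [List.range_succ, List.foldl_append, ih (Nat.le_of_succ_le hm)]
    simp only [List.foldl_cons, List.foldl_nil]
    have hget2 : ((List.range n).map (fun i => if i < m then PySem.Set.add (g i) (L[i]?.getD ' ') else g i))[m]?.getD []
        = g m := by
      simp [List.getElem?_map, List.getElem?_range, hmn]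
    have hget1 : ((List.range n).map (fun i => (((if i < m then PySem.Set.add (g i) (L[i]?.getD ' ') else g i).length : Int))))[m]?.getD 0
        = ((g m).length : Int) := by
      simp [List.getElem?_map, List.getElem?_range, hmn]
    simp only [List.getD_eq_getElem?_getD] at *
    simp only [hget1, hget2]
    by_cases hmem : L[m]?.getD ' ' ∈ g m
    · simp only [hmem, if_true]
      have hadd : PySem.Set.add (g m) (L[m]?.getD ' ') = g m := by
        simp [PySem.Set.add, hmem, PySem.Set.contains, List.contains_eq_mem]
      simp only [Prod.mk.injEq]
      constructor <;>
      · apply List.map_congr_left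
        intro i hi
        by_cases h1 : i = m
        · subst h1
          simp [Nat.lt_irrefl, Nat.lt_succ_self, hadd]
        · have hiff : (i < m + 1) = (i < m) := by
            apply propext; constructor <;> intro <;> omega
          simp [hiff]
    · simp only [hmem, if_false]
      rw [pv_set_map_range n m hmn, pv_set_map_range n m hmn]
      have hadd : PySem.Set.add (g m) (L[m]?.getD ' ') = g m ++ [L[m]?.getD ' '] := by
        simp [PySem.Set.add, hmem, PySem.Set.contains, List.contains_eq_mem]
      simp only [Prod.mk.injEq]
      constructor <;>
      · apply List.map_congr_left
        intro i hi
        by_cases h1 : i = m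
        · subst h1
          simp [Nat.lt_irrefl, Nat.lt_succ_self, hadd]
        · have hiff : (i < m + 1) = (i < m) := by
            apply propext; constructor <;> intro <;> omega
          simp [hiff, h1]

theorem pv_col_append (rows : List String) (c : String) (i : Nat) :
    pvCol (rows ++ [c]) i
    = pvCol rows i ++ (if i < c.toList.length then [c.toList.getD i ' '] else []) := by
  unfold pvCol
  rw [List.filterMap_append]
  congr 1
  simp only [List.filterMap_cons, List.filterMap_nil, List.getD_eq_getElem?_getD,
    String.length_toList]
  by_cases h : i < c.length <;> simp [h]

theorem pv_outer (n : Nat) (rows : List String) (h : ∀ c ∈ rows, c.toList.length ≤ n) :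
    rows.foldl (fun st comb => pvStepA comb st) (List.replicate n 0, List.replicate n [])
    = ((List.range n).map (fun i => (((PySem.Set.ofList (pvCol rows i)).length : Int))),
       (List.range n).map (fun i => PySem.Set.ofList (pvCol rows i))) := by
  induction rows using List.reverseRecOn with
  | nil =>
    simp only [List.foldl_nil, pvCol, List.filterMap_nil, Prod.mk.injEq]
    constructor <;>
    · apply List.ext_getElem <;> simp
  | append_singleton rows c ih =>
    rw [List.foldl_append]
    have hr : ∀ x ∈ rows, x.toList.length ≤ n := fun x hx => h x (by simp [hx])
    have hc : c.toList.length ≤ n := h c (by simp)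
    rw [ih hr]
    simp only [List.foldl_cons, List.foldl_nil]
    rw [pv_inner c n hc]
    simp only [Prod.mk.injEq]
    constructor <;>
    · apply List.map_congr_left
      intro i hi
      rw [pv_col_append]
      by_cases h2 : i < c.length <;>
        simp [h2, PySem.Set.ofList_append_singleton]

theorem pv_head_len (combinations : List String) (hne : combinations ≠ []) :
    ((PySem.List.pyGet? combinations 0).getD "").length
    = (combinations.headD "").toList.length := by
  cases combinations with
  | nil => exact absurd rfl hne
  | cons c rest =>
    simp [PySem.List.pyGet?, PySem.List.pyIdx?]

-- insert b erases the difference between t and t with b filtered out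
theorem pv_insert_filter (b : Char) (t : List Char) :
    insert b t.toFinset = insert b (t.filter (fun x => x ≠ b)).toFinset := by
  ext x
  simp only [Finset.mem_insert, List.mem_toFinset, List.mem_filter, ne_eq, decide_eq_true_eq]
  by_cases hx : x = b <;> simp [hx]

theorem pv_card_cons (b : Char) (t : List Char) :
    ((b :: t).toFinset.card : Int) = 1 + ((t.filter (fun x => x ≠ b)).toFinset.card : Int) := by
  have hnb : b ∉ (t.filter (fun x => x ≠ b)).toFinset := by
    simp [List.mem_filter]
  rw [List.toFinset_cons, pv_insert_filter, Finset.card_insert_of_notMem hnb]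
  push_cast; ring

-- B's scan over a sorted tail, starting from a previous element a below the whole tail
theorem pv_run_aux (t : List Char) (c : Int) (a : Char)
    (hp : t.Pairwise (· ≤ ·)) (ha : ∀ x ∈ t, a ≤ x) :
    (t.foldl pvStepB (c, some a)).1
      = c + ((t.filter (fun x => x ≠ a)).toFinset.card : Int) := by
  induction t generalizing c a with
  | nil => simp
  | cons b t ih =>
    have hpt : t.Pairwise (· ≤ ·) := hp.tail
    have hbt : ∀ x ∈ t, b ≤ x := fun x hx => List.rel_of_pairwise_cons hp hx
    have hab : a ≤ b := ha b (by simp)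
    by_cases hba : b = a
    · subst hba
      have step : pvStepB (c, some b) b = (c, some b) := by simp [pvStepB]
      simp only [List.foldl_cons, step]
      rw [ih c b hpt hbt]
      simp
    · have step : pvStepB (c, some a) b = (c + 1, some b) := by
        simp [pvStepB, hba]
      simp only [List.foldl_cons, step]
      rw [ih (c + 1) b hpt hbt]
      have hta : t.filter (fun x => x ≠ a) = t := by
        apply List.filter_eq_self.2
        intro x hx
        have : a < x := lt_of_lt_of_le (lt_of_le_of_ne hab (Ne.symm hba)) (hbt x hx)
        simp [ne_of_gt this]
      have hfa : (b :: t).filter (fun x => x ≠ a) = b :: t := by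
        rw [List.filter_cons_of_pos (by simp [hba]), hta]
      rw [hfa, pv_card_cons]
      ring

-- B's scan on a sorted list counts the distinct elements
theorem pv_run (l : List Char) (hp : l.Pairwise (· ≤ ·)) :
    (l.foldl pvStepB ((0 : Int), (none : Option Char))).1 = (l.toFinset.card : Int) := by
  cases l with
  | nil => simp
  | cons b t =>
    have step : pvStepB ((0 : Int), (none : Option Char)) b = (1, some b) := by
      simp [pvStepB]
    simp only [List.foldl_cons, step]
    rw [pv_run_aux t 1 b hp.tail (fun x hx => List.rel_of_pairwise_cons hp hx), pv_card_cons]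

-- per-column bridge: seen-list length (A's count) = run count of the sorted column (B's count)
theorem pv_col_count (col : List Char) :
    ((PySem.Set.ofList col).length : Int)
      = ((PySem.List.sorted col (fun x => x) false).foldl pvStepB ((0 : Int), (none : Option Char))).1 := by
  have hpair : (PySem.List.sorted col (fun x => x) false).Pairwise (· ≤ ·) := by
    have := PySem.List.sorted_pairwise (xs := col) (key := fun x => x)
    simpa using this
  rw [pv_run _ hpair]
  have hperm : (PySem.List.sorted col (fun x => x) false).Perm col :=
    PySem.List.sorted_perm ..
  rw [List.toFinset_eq_of_perm _ _ hperm]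
  have hfin : (PySem.Set.ofList col).toFinset = col.toFinset := by
    ext x
    simp [List.mem_toFinset, PySem.Set.mem_ofList]
  have hnd : (PySem.Set.ofList col).Nodup := PySem.Set.nodup_ofList ..
  rw [← hfin, List.toFinset_card_of_nodup hnd]

-- B's append-accumulator loop over range is the map of its body
theorem pv_foldl_append_map {α : Type} (f : Nat → α) (l : List Nat) (acc : List α) :
    l.foldl (fun r i => r ++ [f i]) acc = acc ++ l.map f := by
  induction l generalizing acc with
  | nil => simp
  | cons b t ih => simp [ih]

-- ===== VERDICT (by name: the statement is the Claim_ definition above) =====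
theorem find_variable_positions_spec : Claim_equal_find_variable_positions := by
  intro combinations _ hpre
  obtain ⟨hne, hlen⟩ := hpre
  show find_variable_positions combinations = find_variable_positions_alt combinations
  have hn := pv_head_len combinations hne
  simp only [find_variable_positions, find_variable_positions_alt]
  rw [hn, pv_outer _ _ (fun c hc => hlen c hc), pv_foldl_append_map]
  simp only [List.nil_append]
  apply List.map_congr_left
  intro i hi
  exact pv_col_count (pvCol combinations i)
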